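-- pv_equiv track=rewrite | github.com/Kailar0000/WorkQuest | main.py | str_funcion_draw
-- ===== SOURCE A (Python) =====
-- def str_funcion_draw(str_funcion_array, index):
--     str_funcion_temp_array = [] # Временный список для уравнений
--     for str_ellement in str_funcion_array:
--         for ellement in sim_array:
--             str_temp = str_ellement
--             str_temp = str_temp + ellement + str(num_array[index])
--             str_funcion_temp_array.append(str_temp)
--
--     index = index + 1
--     if (index > 9): # Ограничение для рекурсии
--         return str_funcion_temp_array
--     else:
--         return str_funcion_draw(str_funcion_temp_array, index)
--
-- num_array = [9, 8, 7, 6, 5, 4, 3, 2, 1, 0] # Задаем список чисел.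
--
-- sim_array = ["-", "", "+"] # Список символов
-- ===== SOURCE B (Python) =====
-- num_array = [9, 8, 7, 6, 5, 4, 3, 2, 1, 0]
--
-- sim_array = ["-", "", "+"]
--
-- def str_funcion_draw(str_funcion_array, index):
--     # Factor out the suffix combinations shared by every input string:
--     # build them once, then attach each input string in front.
--     if not str_funcion_array:
--         return []
--     suffixes = [""]
--     while True:
--         suffixes = [p + e + str(num_array[index]) for p in suffixes for e in sim_array]
--         index = index + 1
--         if index > 9:
--             break
--     return [s + p for s in str_funcion_array for p in suffixes]
-- ===== Notes on version B (the rewrite author's own statement) =====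
-- stated objective: alternative
-- what changed: B builds the 3^k sign/digit suffix combinations once with an iterative while-loop and attaches each input string at the end, instead of A's recursion that rebuilds the full per-input intermediate list on every pass.
import Mathlib
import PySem

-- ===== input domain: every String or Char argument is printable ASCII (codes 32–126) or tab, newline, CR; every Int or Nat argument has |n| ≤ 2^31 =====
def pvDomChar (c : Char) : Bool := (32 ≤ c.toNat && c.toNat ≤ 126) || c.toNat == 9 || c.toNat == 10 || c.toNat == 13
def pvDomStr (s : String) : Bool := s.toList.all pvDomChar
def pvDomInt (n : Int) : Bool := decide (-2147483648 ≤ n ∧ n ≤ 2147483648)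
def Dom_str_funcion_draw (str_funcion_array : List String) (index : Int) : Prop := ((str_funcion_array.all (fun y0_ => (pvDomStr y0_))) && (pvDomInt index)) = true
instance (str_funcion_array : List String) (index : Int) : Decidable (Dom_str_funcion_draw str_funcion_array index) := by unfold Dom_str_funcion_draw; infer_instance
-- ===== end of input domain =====

-- B factors the suffix combinations (identical for every input string) out of the
-- per-pass double loop, building them once and attaching the input strings at the end
-- (objective: alternative — a different decomposition that avoids per-input intermediate lists).

-- module constants shared by both Pythons
def num_array : List Int := [9, 8, 7, 6, 5, 4, 3, 2, 1, 0]
def sim_array : List String := ["-", "", "+"]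

-- str(num_array[index]) with Python indexing; Pre_ guarantees the access is in range
-- whenever it is reached, so the .getD 0 default is never the value used.
def digitStr (index : Int) : String :=
  PySem.Int.toStr ((PySem.List.pyGet? num_array index).getD 0)

-- ===== PORT A =====
def str_funcion_draw (str_funcion_array : List String) (index : Int) : List String :=
  let str_funcion_temp_array :=
    str_funcion_array.foldl (fun acc str_ellement =>
      sim_array.foldl (fun acc2 ellement =>
        acc2 ++ [str_ellement ++ ellement ++ digitStr index]) acc) []
  if index + 1 > 9 then str_funcion_temp_array
  else str_funcion_draw str_funcion_temp_array (index + 1)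
termination_by (10 - index).toNat
decreasing_by simp at *; omega

-- ===== PORT B =====
-- the `while True` loop of Source B over `suffixes`
def build_suffixes (suffixes : List String) (index : Int) : List String :=
  let temp := suffixes.flatMap (fun p => sim_array.map (fun e => p ++ e ++ digitStr index))
  if index + 1 > 9 then temp
  else build_suffixes temp (index + 1)
termination_by (10 - index).toNat
decreasing_by simp at *; omega

def str_funcion_draw_alt (str_funcion_array : List String) (index : Int) : List String :=
  if str_funcion_array = [] then []
  else
    let suffixes := build_suffixes [""] index
    str_funcion_array.flatMap (fun s => suffixes.map (fun p => s ++ p))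

-- ===== PRECONDITION & SPEC =====
-- Python A raises IndexError (num_array[index]) on a nonempty list when index is
-- outside the Python-index range -10..9; with the empty list no element access
-- happens and A returns [] for every index.
def Pre_str_funcion_draw (str_funcion_array : List String) (index : Int) : Prop :=
  str_funcion_array = [] ∨ (-10 ≤ index ∧ index ≤ 9)
instance (str_funcion_array : List String) (index : Int) : Decidable (Pre_str_funcion_draw str_funcion_array index) := by unfold Pre_str_funcion_draw; infer_instance

def pvWitness_str_funcion_draw : List String × Int := (["x"], 9)

def Spec_str_funcion_draw (str_funcion_array : List String) (index : Int) (out : List String) : Prop := out = str_funcion_draw_alt str_funcion_array index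
instance (str_funcion_array : List String) (index : Int) (out : List String) : Decidable (Spec_str_funcion_draw str_funcion_array index out) := by unfold Spec_str_funcion_draw; infer_instance

-- ===== CLAIM (what is proved, stated in full; the proofs are below) =====
def Claim_equal_str_funcion_draw : Prop := ∀ (str_funcion_array : List String) (index : Int), Dom_str_funcion_draw str_funcion_array index → Pre_str_funcion_draw str_funcion_array index → Spec_str_funcion_draw str_funcion_array index (str_funcion_draw str_funcion_array index)

-- ===== LEMMAS AND PROOFS =====

-- A's per-pass double foldl, rewritten as a flatMap
theorem passA_eq (arr : List String) (i : Int) :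
    arr.foldl (fun acc s =>
      sim_array.foldl (fun acc2 e => acc2 ++ [s ++ e ++ digitStr i]) acc) []
    = arr.flatMap (fun s => sim_array.map (fun e => s ++ e ++ digitStr i)) := by
  have h : ∀ (init : List String),
      arr.foldl (fun acc s =>
        sim_array.foldl (fun acc2 e => acc2 ++ [s ++ e ++ digitStr i]) acc) init
      = init ++ arr.flatMap (fun s => sim_array.map (fun e => s ++ e ++ digitStr i)) := by
    induction arr with
    | nil => simp
    | cons a t ih =>
      intro init
      simp only [List.foldl_cons, List.flatMap_cons, ih]
      simp [sim_array, List.append_assoc]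
  simpa using h []

-- B's loop invariant: the suffixes built from an arbitrary start list are the
-- suffixes built from [""] attached behind each start element.
theorem build_suffixes_flatMap (n : Nat) (i : Int) (hi : (10 - i).toNat = n) (suf : List String) :
    build_suffixes suf i
    = suf.flatMap (fun p => (build_suffixes [""] i).map (fun q => p ++ q)) := by
  induction n generalizing i suf with
  | zero =>
    have h9 : i + 1 > 9 := by omega
    rw [build_suffixes]
    conv_rhs => rw [build_suffixes]
    simp [h9, Function.comp_def, String.append_assoc]
  | succ n ih =>
    by_cases h9 : i + 1 > 9
    · rw [build_suffixes]
      conv_rhs => rw [build_suffixes]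
      simp [h9, Function.comp_def, String.append_assoc]
    · rw [build_suffixes]
      conv_rhs => rw [build_suffixes]
      simp only [h9, if_false]
      conv_rhs => rw [ih (i + 1) (by omega)]
      rw [ih (i + 1) (by omega)]
      simp [List.flatMap_map, List.map_flatMap, List.map_map, List.flatMap_assoc,
        Function.comp_def, String.append_assoc]

-- A equals B's "common suffixes" formulation on every input
theorem A_eq_suffix_form (n : Nat) (i : Int) (hi : (10 - i).toNat = n) (arr : List String) :
    str_funcion_draw arr i
    = arr.flatMap (fun s => (build_suffixes [""] i).map (fun q => s ++ q)) := by
  induction n generalizing i arr with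
  | zero =>
    have h9 : i + 1 > 9 := by omega
    rw [str_funcion_draw]
    conv_rhs => rw [build_suffixes]
    simp only [h9, if_pos]
    rw [passA_eq]
    simp [List.map_map, Function.comp_def, String.append_assoc]
  | succ n ih =>
    by_cases h9 : i + 1 > 9
    · rw [str_funcion_draw]
      conv_rhs => rw [build_suffixes]
      simp only [h9, if_pos]
      rw [passA_eq]
      simp [List.map_map, Function.comp_def, String.append_assoc]
    · rw [str_funcion_draw]
      conv_rhs => rw [build_suffixes]
      simp only [h9, if_false]
      rw [passA_eq, ih (i + 1) (by omega)]
      conv_rhs => rw [build_suffixes_flatMap (10 - (i + 1)).toNat (i + 1) (by omega)]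
      simp [List.flatMap_map, List.map_flatMap, List.map_map, List.flatMap_assoc,
        Function.comp_def, String.append_assoc]

-- ===== VERDICT (by name: the statement is the Claim_ definition above) =====
theorem str_funcion_draw_spec : Claim_equal_str_funcion_draw := by
  intro arr i _ _
  unfold Spec_str_funcion_draw str_funcion_draw_alt
  rw [A_eq_suffix_form (10 - i).toNat i rfl arr]
  by_cases h : arr = [] <;> simp [h]
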